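-- pv_equiv track=rewrite | github.com/rawi124/Cryptolab | vigenere.py | decouper_avec_dico
-- ===== SOURCE A (Python) =====
-- def decouper_avec_dico(texte,n):
--     dico = {}
--     dic = {}
--     i = 0
--     tmp = ''
--     while(i<len(texte)):
--         t = texte[i:i+n]
--         if (t in dico) :
--             dico[t] = dico[t]+[i]
--             dic[t] = dic[t]+1
--         else:
--             dico[t] = [i]
--             dic[t] = 1
--         i = i + 1
--     liste = []
--     nb = []
--     s = max(dic.values())
--     for k,v in dico.items():
--         if len(v) == s :
--             liste = liste +[k]
--             nb = nb + [dico[k]]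
--     return liste[0],nb[0]
-- ===== SOURCE B (Python) =====
-- def decouper_avec_dico(texte, n):
--     counts = {}
--     for i in range(len(texte)):
--         t = texte[i:i+n]
--         counts[t] = counts.get(t, 0) + 1
--     bestc = max(counts.values())
--     best = next(k for k in counts if counts[k] == bestc)
--     positions = [i for i in range(len(texte)) if texte[i:i+n] == best]
--     return best, positions
-- ===== Notes on version B (the rewrite author's own statement) =====
-- stated objective: faster
-- what changed: B keeps only a frequency dict (no positions) in pass 1, picks the first max-count substring, then rescans the text once collecting its positions; A's quadratic dico[t]+[i] list-copying per occurrence disappears.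
import Mathlib
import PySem

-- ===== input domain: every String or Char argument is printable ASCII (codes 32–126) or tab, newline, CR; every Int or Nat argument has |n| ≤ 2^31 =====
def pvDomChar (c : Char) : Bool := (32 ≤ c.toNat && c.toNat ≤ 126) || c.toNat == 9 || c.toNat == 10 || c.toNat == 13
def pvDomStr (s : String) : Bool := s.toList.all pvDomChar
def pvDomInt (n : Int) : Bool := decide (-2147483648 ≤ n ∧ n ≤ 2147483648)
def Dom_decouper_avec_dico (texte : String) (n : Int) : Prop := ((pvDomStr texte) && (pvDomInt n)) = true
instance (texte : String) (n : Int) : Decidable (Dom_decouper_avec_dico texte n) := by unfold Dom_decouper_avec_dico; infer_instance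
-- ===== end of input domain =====

-- B replaces A's store-all-positions dict (with per-occurrence list copying) by a count-only
-- dict plus a second scan collecting the winner's positions; a timing run measured B faster.


-- ===== PORT A =====
-- while i < len(texte): one pass building dico (position lists, extended by list concatenation)
-- and dic (counts); s = max(dic.values()); then a filter loop over dico.items collecting the
-- max-count keys and their position lists; return (liste[0], nb[0]).
def decouper_avec_dico (texte : String) (n : Int) : String × List Int :=
  let cs := texte.toList
  let dd := (List.range cs.length).foldl
    (fun (st : PySem.Dict (List Char) (List Int) × PySem.Dict (List Char) Int) (i : Nat) =>
      let t := PySem.List.slice cs (some (i : Int)) (some ((i : Int) + n))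
      if st.1.contains t then
        (st.1.insert t (st.1.getD t [] ++ [(i : Int)]), st.2.insert t (st.2.getD t 0 + 1))
      else
        (st.1.insert t [(i : Int)], st.2.insert t 1))
    (PySem.Dict.empty, PySem.Dict.empty)
  let s := (PySem.List.max? dd.2.values (fun x => x)).getD 0
  let ln := dd.1.items.foldl
    (fun (p : List (List Char) × List (List Int)) kv =>
      if (kv.2.length : Int) = s then (p.1 ++ [kv.1], p.2 ++ [dd.1.getD kv.1 []]) else p)
    ([], [])
  (String.ofList (PySem.List.pyGetD ln.1 0 []), PySem.List.pyGetD ln.2 0 [])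

-- ===== PORT B =====
-- pass 1: counts dict only; bestc = max(counts.values()); best = first key with count bestc;
-- pass 2: collect every i with texte[i:i+n] == best.
def decouper_avec_dico_alt (texte : String) (n : Int) : String × List Int :=
  let cs := texte.toList
  let counts := (List.range cs.length).foldl
    (fun (d : PySem.Dict (List Char) Int) (i : Nat) =>
      d.modify (PySem.List.slice cs (some (i : Int)) (some ((i : Int) + n))) 0 (· + 1))
    PySem.Dict.empty
  let bestc := (PySem.List.max? counts.values (fun x => x)).getD 0
  let best := (counts.keys.find? (fun k => counts.getD k 0 == bestc)).getD []
  let positions := ((List.range cs.length).filter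
      (fun (i : Nat) => PySem.List.slice cs (some (i : Int)) (some ((i : Int) + n)) == best)).map
      (fun (i : Nat) => (i : Int))
  (String.ofList best, positions)


-- ===== PRECONDITION & SPEC =====
-- Pre_ excludes only texte = "": there A's max(dic.values()) (and B's max(counts.values())) raises ValueError.
def Pre_decouper_avec_dico (texte : String) (n : Int) : Prop := texte.toList ≠ []
instance (texte : String) (n : Int) : Decidable (Pre_decouper_avec_dico texte n) := by
  unfold Pre_decouper_avec_dico; infer_instance
def pvWitness_decouper_avec_dico : String × Int := ("abab", 2)
def Spec_decouper_avec_dico (texte : String) (n : Int) (out : String × List Int) : Prop := out = decouper_avec_dico_alt texte n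
instance (texte : String) (n : Int) (out : String × List Int) : Decidable (Spec_decouper_avec_dico texte n out) := by unfold Spec_decouper_avec_dico; infer_instance

-- ===== CLAIM (what is proved, stated in full; the proofs are below) =====
def Claim_equal_decouper_avec_dico : Prop := ∀ (texte : String) (n : Int), Dom_decouper_avec_dico texte n → Pre_decouper_avec_dico texte n → Spec_decouper_avec_dico texte n (decouper_avec_dico texte n)

-- ===== LEMMAS AND PROOFS =====
theorem pvFoldA_split (f : Nat → List Char) (l : List Nat)
    (d1 : PySem.Dict (List Char) (List Int)) (d2 : PySem.Dict (List Char) Int)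
    (h : ∀ t, d1.contains t = d2.contains t) :
    l.foldl
      (fun (st : PySem.Dict (List Char) (List Int) × PySem.Dict (List Char) Int) (i : Nat) =>
        if st.1.contains (f i) then
          (st.1.insert (f i) (st.1.getD (f i) [] ++ [(i : Int)]), st.2.insert (f i) (st.2.getD (f i) 0 + 1))
        else
          (st.1.insert (f i) [(i : Int)], st.2.insert (f i) 1)) (d1, d2)
    = (l.foldl (fun d i => d.modify (f i) [] (· ++ [(i : Int)])) d1,
       l.foldl (fun d i => d.modify (f i) 0 (· + 1)) d2) := by
  induction l generalizing d1 d2 with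
  | nil => rfl
  | cons i l ih =>
    simp only [List.foldl_cons]
    have hstep :
        (if d1.contains (f i) then
          (d1.insert (f i) (d1.getD (f i) [] ++ [(i : Int)]), d2.insert (f i) (d2.getD (f i) 0 + 1))
        else
          (d1.insert (f i) [(i : Int)], d2.insert (f i) 1))
        = (d1.modify (f i) [] (· ++ [(i : Int)]), d2.modify (f i) 0 (· + 1)) := by
      by_cases hc : d1.contains (f i) = true
      · simp only [hc, if_true]; rfl
      · have hc2 : d2.contains (f i) = false := by rw [← h]; simpa using hc
        simp only [hc, Bool.false_eq_true, if_false]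
        rw [show d1.modify (f i) [] (· ++ [(i : Int)]) = d1.insert (f i) (d1.getD (f i) [] ++ [(i:Int)]) from rfl,
            show d2.modify (f i) 0 (· + 1) = d2.insert (f i) (d2.getD (f i) 0 + 1) from rfl,
            PySem.Dict.getD_of_not_contains d1 [] (by simpa using hc),
            PySem.Dict.getD_of_not_contains d2 0 hc2]
        rfl
    rw [hstep]
    exact ih _ _ (fun t => by simp [PySem.Dict.contains_modify, h t])

theorem pvFoldl_pair_filter {α β γ : Type} (P : α → Prop) [DecidablePred P] (g1 : α → β) (g2 : α → γ)
    (l : List α) (a : List β) (b : List γ) :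
    l.foldl (fun (s : List β × List γ) kv =>
        if P kv then (s.1 ++ [g1 kv], s.2 ++ [g2 kv]) else s) (a, b)
    = (a ++ (l.filter (fun x => decide (P x))).map g1, b ++ (l.filter (fun x => decide (P x))).map g2) := by
  induction l generalizing a b with
  | nil => simp
  | cons x l ih =>
    by_cases h : P x <;> simp [h, ih, List.append_assoc]

theorem pvGetD_head {α : Type} (l : List α) (d : α) : l.getD 0 d = l.head?.getD d := by
  cases l <;> rfl

theorem pvBeqDecide (a b : Int) : decide (a = b) = (a == b) := by
  by_cases h : a = b <;> simp [h]

theorem pvCore (sl : Nat → List Char) (l : List Nat) (hne : l ≠ []) :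
    (let A1 := l.foldl (fun d i => d.modify (sl i) [] (· ++ [(i : Int)]))
        (PySem.Dict.empty : PySem.Dict (List Char) (List Int))
     let counts := l.foldl (fun d i => d.modify (sl i) 0 (· + 1))
        (PySem.Dict.empty : PySem.Dict (List Char) Int)
     let s := (PySem.List.max? counts.values (fun x => x)).getD 0
     let ln := A1.items.foldl
        (fun (p : List (List Char) × List (List Int)) kv =>
          if (kv.2.length : Int) = s then (p.1 ++ [kv.1], p.2 ++ [A1.getD kv.1 []]) else p)
        ([], [])
     ((String.ofList (PySem.List.pyGetD ln.1 0 []), PySem.List.pyGetD ln.2 0 []) : String × List Int))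
    = (let counts := l.foldl (fun d i => d.modify (sl i) 0 (· + 1))
          (PySem.Dict.empty : PySem.Dict (List Char) Int)
       let bestc := (PySem.List.max? counts.values (fun x => x)).getD 0
       let best := (counts.keys.find? (fun k => counts.getD k 0 == bestc)).getD []
       (String.ofList best, (l.filter (fun i => sl i == best)).map (fun (i : Nat) => (i : Int)))) := by
  set A1 := l.foldl (fun d i => d.modify (sl i) [] (· ++ [(i : Int)]))
      (PySem.Dict.empty : PySem.Dict (List Char) (List Int)) with hA1
  set counts := l.foldl (fun d i => d.modify (sl i) 0 (· + 1))
      (PySem.Dict.empty : PySem.Dict (List Char) Int) with hcounts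
  set ts : List (List Char) := l.map sl with hts
  -- counts is the counter of ts
  have hcnt : counts = PySem.Dict.counter ts := by
    rw [PySem.Dict.counter_eq_foldl, hts, List.foldl_map]
  -- A1's stored lists are the position lists
  have hgetD : ∀ c, A1.getD c []
      = (l.filter (fun i => sl i == c)).map (fun (i : Nat) => (i : Int)) := by
    intro c
    have hm : A1 = (l.map (fun i => (sl i, (i : Int)))).foldl
        (fun d p => d.modify p.1 [] (· ++ [p.2])) PySem.Dict.empty := by
      rw [hA1, List.foldl_map]
    rw [hm, PySem.Dict.getD_foldl_modify_append, List.filter_map]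
    simp only [PySem.Dict.getD_empty, List.nil_append, List.map_map]
    rfl
  -- keys coincide
  have hkeysA : A1.keys = counts.keys := by
    rw [hA1, hcounts,
      PySem.Dict.keys_foldl_modify_key l sl [] (fun _ i => (· ++ [(i : Int)])) PySem.Dict.empty,
      PySem.Dict.keys_foldl_modify_key l sl 0 (fun _ _ => (· + 1)) PySem.Dict.empty]
    rfl
  have hnodup : counts.keys.Nodup := by
    rw [hcnt]; exact PySem.Dict.nodup_keys_counter ts
  have hnodupA : A1.keys.Nodup := by rw [hkeysA]; exact hnodup
  -- length of stored list = count
  have hlen : ∀ c, ((A1.getD c []).length : Int) = counts.getD c 0 := by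
    intro c
    rw [hgetD c, hcnt, PySem.Dict.getD_counter]
    rw [hts, List.count_eq_countP, List.countP_map, List.countP_eq_length_filter]
    simp only [List.length_map]
    rfl
  -- the extremum exists
  have hKne : counts.keys ≠ [] := by
    rw [hcnt, PySem.Dict.keys_counter]
    have : sl (l.head hne) ∈ ts := by
      rw [hts]; exact List.mem_map_of_mem (List.head_mem hne)
    exact List.ne_nil_of_mem ((PySem.Set.mem_ofList ts _).mpr this)
  have hvne : counts.values ≠ [] := by
    rw [PySem.Dict.values_eq_map_keys counts hnodup 0]
    simpa using hKne
  obtain ⟨m, hm⟩ : ∃ m, PySem.List.max? counts.values (fun x => x) = some m := by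
    cases h : PySem.List.max? counts.values (fun x => x) with
    | none => exact absurd ((PySem.List.max?_eq_none_iff _ _).mp h) hvne
    | some m => exact ⟨m, rfl⟩
  have hs : (PySem.List.max? counts.values (fun x => x)).getD 0 = m := by rw [hm]; rfl
  have hmv : m ∈ counts.values := PySem.List.max?_mem hm
  rw [PySem.Dict.values_eq_map_keys counts hnodup 0] at hmv
  obtain ⟨k0, hk0K, hk0⟩ := List.mem_map.mp hmv
  -- the B-side predicate
  have hfind : ((counts.keys.find? (fun k => counts.getD k 0 == m))).isSome := by
    rw [List.find?_isSome]
    exact ⟨k0, hk0K, by rw [hk0]; simp⟩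
  obtain ⟨best0, hbest0⟩ := Option.isSome_iff_exists.mp hfind
  -- compute both sides
  simp only []
  rw [hs]
  rw [pvFoldl_pair_filter (fun kv => (kv.2.length : Int) = m) (fun kv => kv.1)
      (fun kv => A1.getD kv.1 []) A1.items [] []]
  rw [PySem.Dict.items_eq_map_keys A1 hnodupA [], List.filter_map]
  have hpred : ((fun (x : (List Char) × List Int) => decide ((x.2.length : Int) = m)) ∘ (fun k => (k, A1.getD k [])))
      = fun k => counts.getD k 0 == m := by
    funext k
    simp only [Function.comp_apply]
    rw [hlen k, pvBeqDecide]
  rw [hpred, hkeysA]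
  rw [hbest0]
  have hhead : (counts.keys.filter (fun k => counts.getD k 0 == m)).head? = some best0 := by
    rw [List.head?_filter, hbest0]
  congr 1
  · -- first components
    dsimp only
    simp only [List.nil_append, List.map_map]
    rw [show ((fun (p : (List Char) × List Int) => p.1) ∘ (fun k => (k, A1.getD k []))) = id by funext k; rfl]
    rw [List.map_id, PySem.List.pyGetD_zero, pvGetD_head, hhead]
  · -- second components
    dsimp only
    simp only [List.nil_append, List.map_map]
    rw [PySem.List.pyGetD_zero, pvGetD_head, List.head?_map, hhead]
    simp only [Option.map_some, Option.getD_some, Function.comp_def]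
    exact hgetD best0

theorem pvMain (texte : String) (n : Int) (hpre : texte.toList ≠ []) :
    decouper_avec_dico texte n = decouper_avec_dico_alt texte n := by
  unfold decouper_avec_dico decouper_avec_dico_alt
  dsimp only
  rw [pvFoldA_split (fun i => PySem.List.slice texte.toList (some (i : Int)) (some ((i : Int) + n)))
        (List.range texte.toList.length) PySem.Dict.empty PySem.Dict.empty (fun t => rfl)]
  exact pvCore (fun i => PySem.List.slice texte.toList (some (i : Int)) (some ((i : Int) + n)))
    (List.range texte.toList.length)
    (by
      have h0 : 0 < texte.toList.length := List.length_pos_iff.mpr hpre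
      simp only [ne_eq, List.range_eq_nil]
      omega)

-- ===== VERDICT (by name: the statement is the Claim_ definition above) =====
theorem decouper_avec_dico_spec : Claim_equal_decouper_avec_dico := by
  intro texte n _ hpre
  unfold Spec_decouper_avec_dico
  exact pvMain texte n hpre
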